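-- pv_equiv track=rewrite | github.com/ashishmh/epi-judge | epi_judge_python/anagrams.py | get_char_map
-- ===== SOURCE A (Python) =====
-- def get_char_map(word):
--     mapping = {}
--     for c in word:
--         if c in mapping:
--             mapping[c] +=1
--         else:
--             mapping[c] = 1
--     return tuple(sorted(mapping.items()))
-- ===== SOURCE B (Python) =====
-- def get_char_map(word):
--     s = sorted(word)
--     out = []
--     i = 0
--     n = len(s)
--     while i < n:
--         j = i
--         while j < n and s[j] == s[i]:
--             j += 1
--         out.append((s[i], j - i))
--         i = j
--     return tuple(out)
-- ===== Notes on version B (the rewrite author's own statement) =====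
-- stated objective: alternative
-- what changed: Instead of counting characters into a dict and then sorting the items, B sorts the characters once and makes a single grouping pass that emits (char, run-length) for each maximal run of equal characters, needing no hash map and no final sort of pairs.
import Mathlib
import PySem

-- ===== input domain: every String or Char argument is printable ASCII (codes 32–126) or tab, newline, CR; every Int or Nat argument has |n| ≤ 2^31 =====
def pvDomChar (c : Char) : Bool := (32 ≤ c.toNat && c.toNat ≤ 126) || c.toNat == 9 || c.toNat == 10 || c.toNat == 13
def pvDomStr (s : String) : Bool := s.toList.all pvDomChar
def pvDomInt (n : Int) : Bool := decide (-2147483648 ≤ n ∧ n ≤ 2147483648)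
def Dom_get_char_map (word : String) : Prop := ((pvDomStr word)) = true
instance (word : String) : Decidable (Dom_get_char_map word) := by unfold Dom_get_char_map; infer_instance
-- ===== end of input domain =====

-- B replaces A's dict-count-then-sort with a single grouping pass over the sorted characters (alternative decomposition, no hash map).

-- ===== PORT A =====
-- A: build a dict of counts over the word, then return sorted(mapping.items());
-- Python sorts the (1-char-string, int) tuples lexicographically -> sorted2 on (fst, snd).
def get_char_map (word : String) : List (String × Int) :=
  let mapping : PySem.Dict String Int :=
    word.toList.foldl
      (fun d c =>
        if d.contains c.toString then d.insert c.toString (d.getD c.toString 0 + 1)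
        else d.insert c.toString 1)
      PySem.Dict.empty
  PySem.List.sorted2 mapping.items (fun p => p.1) (fun p => p.2) false

-- ===== PORT B =====
-- Source B: s = sorted(word); the outer while emits one (char, run-length) pair per maximal
-- run of equal characters (the inner while that advances j over the run = takeWhile,
-- the outer advance i = j = dropWhile); j - i = 1 + length of the run after s[i].
def pvGroupRuns : List Char → List (String × Int)
  | [] => []
  | c :: rest =>
      (c.toString, 1 + ((rest.takeWhile (fun x => x == c)).length : Int))
        :: pvGroupRuns (rest.dropWhile (fun x => x == c))
termination_by l => l.length
decreasing_by
  simp only [List.length_cons]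
  exact Nat.lt_succ_of_le ((List.dropWhile_sublist _).length_le)

def get_char_map_alt (word : String) : List (String × Int) :=
  pvGroupRuns (PySem.List.sorted word.toList (fun c => c) false)

-- ===== PRECONDITION & SPEC =====
def Spec_get_char_map (word : String) (out : List (String × Int)) : Prop := out = get_char_map_alt word
instance (word : String) (out : List (String × Int)) : Decidable (Spec_get_char_map word out) := by unfold Spec_get_char_map; infer_instance

-- ===== CLAIM (what is proved, stated in full; the proofs are below) =====
def Claim_equal_get_char_map : Prop := ∀ (word : String), Dom_get_char_map word → Spec_get_char_map word (get_char_map word)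

-- ===== LEMMAS AND PROOFS =====

theorem pvToString_inj : Function.Injective Char.toString := by
  intro a b h
  simpa [Char.toString, String.singleton] using congrArg String.toList h

theorem pvToString_lt {a b : Char} (h : a < b) : a.toString < b.toString := by
  have hl : a.toString.toList < b.toString.toList := by
    simp only [Char.toString, String.toList_singleton]
    exact List.cons_lt_cons_iff.mpr (Or.inl h)
  exact String.lt_iff_toList_lt.mpr hl

theorem pvContains_eq {α : Type} [BEq α] [LawfulBEq α] (s : List α) (x : α) :
    PySem.Set.contains s x = decide (x ∈ s) := by
  simp [PySem.Set.contains]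

theorem pvOfList_map {α β : Type} [BEq α] [LawfulBEq α] [BEq β] [LawfulBEq β]
    (f : α → β) (hf : Function.Injective f) (xs : List α) :
    PySem.Set.ofList (xs.map f) = (PySem.Set.ofList xs).map f := by
  rw [PySem.Set.ofList_eq_foldl, PySem.Set.ofList_eq_foldl]
  suffices h : ∀ (acc : List α),
      (xs.map f).foldl PySem.Set.add (acc.map f) = (xs.foldl PySem.Set.add acc).map f by
    simpa using h []
  induction xs with
  | nil => intro acc; simp
  | cons x xs ih =>
    intro acc
    simp only [List.map_cons, List.foldl_cons]
    have hadd : PySem.Set.add (acc.map f) (f x) = (PySem.Set.add acc x).map f := by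
      simp only [PySem.Set.add, pvContains_eq]
      by_cases hx : x ∈ acc
      · have hfx : f x ∈ acc.map f := List.mem_map_of_mem hx
        simp [hx, hfx]
      · have hfx : f x ∉ acc.map f := by
          simp only [List.mem_map, not_exists]
          rintro y ⟨hy, he⟩
          exact hx (hf he ▸ hy)
        simp [hx, hfx]
    rw [hadd, ih]

theorem pvInsertBy_congr {α : Type} (b1 b2 : α → α → Bool) (x : α) (ys : List α)
    (h : ∀ y ∈ ys, b1 x y = b2 x y) :
    PySem.List.insertBy b1 x ys = PySem.List.insertBy b2 x ys := by
  induction ys with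
  | nil => rfl
  | cons y ys ih =>
    have hy : b1 x y = b2 x y := h y (by simp)
    have hys : ∀ z ∈ ys, b1 x z = b2 x z := fun z hz => h z (by simp [hz])
    simp only [PySem.List.insertBy, hy, ih hys]

theorem pvFoldl_insertBy_congr {α : Type} (S : List α) (b1 b2 : α → α → Bool)
    (hb : ∀ x ∈ S, ∀ y ∈ S, b1 x y = b2 x y) :
    ∀ (l acc : List α), (∀ x ∈ l, x ∈ S) → (∀ y ∈ acc, y ∈ S) →
      l.foldl (fun acc x => PySem.List.insertBy b1 x acc) acc
        = l.foldl (fun acc x => PySem.List.insertBy b2 x acc) acc := by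
  intro l
  induction l with
  | nil => intro acc _ _; rfl
  | cons x l ih =>
    intro acc hl hacc
    have hx : x ∈ S := hl x (by simp)
    simp only [List.foldl_cons]
    rw [pvInsertBy_congr b1 b2 x acc (fun y hy => hb x hx y (hacc y hy))]
    exact ih _ (fun z hz => hl z (by simp [hz]))
      (fun y hy => ((PySem.List.mem_insertBy b2 x y acc).mp hy).elim (fun h => h ▸ hx) (fun h => hacc y h))

theorem pvSorted2_eq_sorted (l : List (String × Int))
    (hl : ∀ p ∈ l, ∀ q ∈ l, p.1 = q.1 → p = q) :
    PySem.List.sorted2 l (fun p => p.1) (fun p => p.2) false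
      = PySem.List.sorted l (fun p => p.1) false := by
  have hdef : PySem.List.sorted2 l (fun p => p.1) (fun p => p.2) false
      = l.foldl (fun acc x => PySem.List.insertBy
          (fun a b => decide (a.1 < b.1) || (!decide (b.1 < a.1) && decide (a.2 < b.2))) x acc) [] := rfl
  rw [hdef, PySem.List.sorted_eq_foldl_insertBy]
  apply pvFoldl_insertBy_congr l _ _ ?_ l [] (fun _ h => h) (by simp)
  intro x hx y hy
  by_cases hxy : x.1 = y.1
  · have hxe : x = y := hl x hx y hy hxy
    subst hxe; simp
  · by_cases hlt : x.1 < y.1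
    · simp [hlt]
    · have hgt : y.1 < x.1 := lt_of_le_of_ne (not_lt.mp hlt) (fun h => hxy h.symm)
      simp [hlt, hgt]

theorem pvDropWhile_gt (c : Char) : ∀ (rest : List Char), (∀ x ∈ rest, c ≤ x) →
    rest.Pairwise (· ≤ ·) → ∀ x ∈ rest.dropWhile (fun y => y == c), c < x := by
  intro rest
  induction rest with
  | nil => simp
  | cons a l ih =>
    intro hle hpr x hx
    rw [List.dropWhile_cons] at hx
    by_cases ha : (a == c) = true
    · rw [if_pos ha] at hx
      exact ih (fun z hz => hle z (by simp [hz])) (List.pairwise_cons.mp hpr).2 x hx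
    · rw [if_neg ha] at hx
      have hca : c < a := lt_of_le_of_ne (hle a (by simp)) (fun h => ha (by simp [h.symm]))
      rcases List.mem_cons.mp hx with rfl | hxl
      · exact hca
      · exact lt_of_lt_of_le hca ((List.pairwise_cons.mp hpr).1 x hxl)

theorem pvCount_head (c : Char) (rest : List Char) (hle : ∀ x ∈ rest, c ≤ x)
    (hpr : rest.Pairwise (· ≤ ·)) :
    (c :: rest).count c = 1 + (rest.takeWhile (fun y => y == c)).length := by
  have hsplit : rest.count c
      = (rest.takeWhile (fun y => y == c)).count c + (rest.dropWhile (fun y => y == c)).count c := by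
    conv_lhs => rw [← List.takeWhile_append_dropWhile (p := fun y => y == c) (l := rest)]
    rw [List.count_append]
  have htw : (rest.takeWhile (fun y => y == c)).count c
      = (rest.takeWhile (fun y => y == c)).length := by
    refine List.count_eq_length.mpr (fun b hb => ?_)
    have := List.mem_takeWhile_imp hb
    simp at this
    exact this.symm
  have hdw : (rest.dropWhile (fun y => y == c)).count c = 0 := by
    refine List.count_eq_zero.mpr (fun h => ?_)
    exact absurd (pvDropWhile_gt c rest hle hpr c h) (lt_irrefl c)
  rw [List.count_cons_self, hsplit, htw, hdw]
  omega

theorem pvCount_tail (c d : Char) (rest : List Char) (hcd : c < d)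
    (hd : d ∈ rest.dropWhile (fun y => y == c)) :
    (c :: rest).count d = (rest.dropWhile (fun y => y == c)).count d := by
  have hdc : d ≠ c := fun h => absurd (h ▸ hcd) (lt_irrefl c)
  have h1 : (c :: rest).count d = rest.count d := by
    simp [List.count_cons]
    exact fun h => hdc h.symm
  rw [h1]
  conv_lhs => rw [← List.takeWhile_append_dropWhile (p := fun y => y == c) (l := rest)]
  rw [List.count_append]
  have htw : (rest.takeWhile (fun y => y == c)).count d = 0 := by
    refine List.count_eq_zero.mpr (fun h => ?_)
    have := List.mem_takeWhile_imp h
    simp at this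
    exact hdc (by rw [this])
  rw [htw]; omega

theorem pvGR_mem : ∀ (s : List Char), s.Pairwise (· ≤ ·) → ∀ (p : String × Int),
    (p ∈ pvGroupRuns s ↔ ∃ c, c ∈ s ∧ p = (c.toString, (s.count c : Int))) := by
  intro s
  induction s using pvGroupRuns.induct with
  | case1 => intro _ p; simp [pvGroupRuns]
  | case2 c rest ih =>
    intro hs p
    have hle := (List.pairwise_cons.mp hs).1
    have hpr := (List.pairwise_cons.mp hs).2
    have hgt := pvDropWhile_gt c rest hle hpr
    have hp' : (rest.dropWhile (fun x => x == c)).Pairwise (· ≤ ·) :=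
      List.Pairwise.sublist (List.dropWhile_sublist _) hpr
    have hhead : ((c :: rest).count c : Int)
        = 1 + ((rest.takeWhile (fun x => x == c)).length : Int) := by
      rw [pvCount_head c rest hle hpr]; push_cast; ring
    rw [pvGroupRuns]
    simp only [List.mem_cons]
    rw [ih hp']
    constructor
    · rintro (rfl | ⟨d, hd, rfl⟩)
      · exact ⟨c, by simp, by rw [hhead]⟩
      · refine ⟨d, Or.inr ((List.dropWhile_sublist _).subset hd), ?_⟩
        rw [pvCount_tail c d rest (hgt d hd) hd]
    · rintro ⟨d, hd, rfl⟩
      rcases hd with rfl | hdrest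
      · left; rw [hhead]
      · have : d ∈ rest.takeWhile (fun x => x == c) ∨ d ∈ rest.dropWhile (fun x => x == c) := by
          rw [← List.mem_append, List.takeWhile_append_dropWhile]; exact hdrest
        rcases this with htw | hdw
        · have hdc : d = c := by
            have := List.mem_takeWhile_imp htw
            simpa using this
          subst hdc
          left; rw [hhead]
        · right
          exact ⟨d, hdw, by rw [pvCount_tail c d rest (hgt d hdw) hdw]⟩

theorem pvGR_pairwise : ∀ (s : List Char), s.Pairwise (· ≤ ·) →
    (pvGroupRuns s).Pairwise (fun p q => p.1 < q.1) := by
  intro s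
  induction s using pvGroupRuns.induct with
  | case1 => intro _; simp [pvGroupRuns]
  | case2 c rest ih =>
    intro hs
    have hle := (List.pairwise_cons.mp hs).1
    have hpr := (List.pairwise_cons.mp hs).2
    have hgt := pvDropWhile_gt c rest hle hpr
    have hp' : (rest.dropWhile (fun x => x == c)).Pairwise (· ≤ ·) :=
      List.Pairwise.sublist (List.dropWhile_sublist _) hpr
    rw [pvGroupRuns]
    refine List.pairwise_cons.mpr ⟨?_, ih hp'⟩
    intro q hq
    obtain ⟨d, hd, rfl⟩ := (pvGR_mem _ hp' q).mp hq
    exact pvToString_lt (hgt d hd)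

theorem pvGR_nodup (s : List Char) (hs : s.Pairwise (· ≤ ·)) : (pvGroupRuns s).Nodup :=
  (pvGR_pairwise s hs).imp (fun h heq => absurd (heq ▸ h) (lt_irrefl _))

-- ===== VERDICT (by name: the statement is the Claim_ definition above) =====
theorem get_char_map_spec : Claim_equal_get_char_map := by
  intro word _
  show get_char_map word = get_char_map_alt word
  have hmap : (word.toList.foldl
      (fun d c =>
        if d.contains c.toString then d.insert c.toString (d.getD c.toString 0 + 1)
        else d.insert c.toString 1)
      PySem.Dict.empty)
      = PySem.Dict.counter (word.toList.map Char.toString) := by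
    rw [PySem.List.foldl_congr_mem _ _
      (fun (d : PySem.Dict String Int) c => d.insert c.toString (d.getD c.toString 0 + 1)) _ ?_]
    · rw [← List.foldl_map (f := Char.toString)
        (g := fun (d : PySem.Dict String Int) x => d.insert x (d.getD x 0 + 1))]
      exact PySem.Dict.foldl_insert_getD_add_one_eq_counter _
    · intro acc x _
      by_cases h : acc.contains x.toString = true
      · rw [if_pos h]
      · have h' : acc.contains x.toString = false := by simpa using h
        rw [if_neg h]
        show acc.insert x.toString 1 = acc.insert x.toString (acc.getD x.toString 0 + 1)
        rw [PySem.Dict.getD_of_not_contains _ _ h']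
        norm_num
  have hitems : (PySem.Dict.counter (word.toList.map Char.toString)).items
      = (PySem.Set.ofList word.toList).map (fun c => (c.toString, (word.toList.count c : Int))) := by
    rw [PySem.Dict.items_counter, pvOfList_map Char.toString pvToString_inj, List.map_map]
    refine List.map_congr_left (fun c _ => ?_)
    have hcnt := List.count_map_of_injective word.toList Char.toString pvToString_inj c
    simp only [Function.comp_apply, hcnt]
  simp only [get_char_map, get_char_map_alt]
  rw [hmap, hitems]
  have hginj : Function.Injective (fun c : Char => (c.toString, (word.toList.count c : Int))) := by
    intro a b h
    exact pvToString_inj (congrArg Prod.fst h)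
  have hL : ∀ p ∈ (PySem.Set.ofList word.toList).map
        (fun c => (c.toString, (word.toList.count c : Int))),
      ∀ q ∈ (PySem.Set.ofList word.toList).map
        (fun c => (c.toString, (word.toList.count c : Int))), p.1 = q.1 → p = q := by
    intro p hp q hq hpq
    obtain ⟨c1, _, rfl⟩ := List.mem_map.mp hp
    obtain ⟨c2, _, rfl⟩ := List.mem_map.mp hq
    have : c1 = c2 := pvToString_inj hpq
    rw [this]
  rw [pvSorted2_eq_sorted _ hL]
  have hsPair : (PySem.List.sorted word.toList (fun c => c) false).Pairwise (· ≤ ·) := by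
    simpa using PySem.List.sorted_pairwise word.toList (fun c => c)
  have hperm := PySem.List.sorted_perm word.toList (fun c => c) false
  apply PySem.List.sorted_eq_of_perm_of_pairwise_lt
  · refine (List.perm_ext_iff_of_nodup (pvGR_nodup _ hsPair)
      (List.Nodup.map hginj (PySem.Set.nodup_ofList _))).mpr ?_
    intro p
    rw [pvGR_mem _ hsPair p]
    simp only [List.mem_map]
    constructor
    · rintro ⟨c, hc, rfl⟩
      refine ⟨c, ?_, ?_⟩
      · rw [PySem.Set.mem_ofList]
        exact (PySem.List.mem_sorted _ _ _ _).mp hc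
      · rw [hperm.count_eq c]
    · rintro ⟨c, hc, rfl⟩
      refine ⟨c, ?_, ?_⟩
      · rw [PySem.List.mem_sorted]
        exact (PySem.Set.mem_ofList _ _).mp hc
      · rw [hperm.count_eq c]
  · exact pvGR_pairwise _ hsPair
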